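-- pv_equiv track=rewrite | github.com/desitomato/cartvalue | assign.py | cartvalue
-- ===== SOURCE A (Python) =====
-- def cartvalue(Z):
--     count_A = count_B = count_C = count_D = 0
--     sum_A = sum_B = sum_C = sum_D = special_A = special_B = 0
--     for x in Z:
--         if x =='A': count_A+=1
--         if x =='B': count_B+=1
--         if x =='C': count_C+=1; sum_C = 20*count_C
--         if x =='D': count_D+=1; sum_D = 15*count_D
--     if count_A>0: acount = count_A%3; setacount = count_A//3; sum_A = 50*acount; special_A = 130*setacount
--     if count_B>0: bcount = count_B%2; setbcount = count_B//2; sum_B = 30*bcount; special_B = 45*setbcount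
--     total_cartval = sum_A + sum_B + sum_C + sum_D + special_A + special_B
--     return total_cartval
-- ===== SOURCE B (Python) =====
-- PRICE = {'A': (50, 3, 130), 'B': (30, 2, 45), 'C': (20, 1, 20), 'D': (15, 1, 15)}
--
-- def cartvalue(Z):
--     seen = {}
--     total = 0
--     for x in Z:
--         if x in PRICE:
--             unit, size, bundle = PRICE[x]
--             n = seen.get(x, 0) + 1
--             seen[x] = n
--             total += bundle - (size - 1) * unit if n % size == 0 else unit
--     return total
-- ===== Notes on version B (the rewrite author's own statement) =====
-- stated objective: alternative
-- what changed: Replaces count-then-price (accumulate four counts, then apply bundle pricing after the loop) by table-driven incremental marginal pricing: each item immediately adds its unit price, or the bundle-completion price when it fills a bundle, so no post-loop pricing or //-arithmetic over totals exists.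
import Mathlib
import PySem

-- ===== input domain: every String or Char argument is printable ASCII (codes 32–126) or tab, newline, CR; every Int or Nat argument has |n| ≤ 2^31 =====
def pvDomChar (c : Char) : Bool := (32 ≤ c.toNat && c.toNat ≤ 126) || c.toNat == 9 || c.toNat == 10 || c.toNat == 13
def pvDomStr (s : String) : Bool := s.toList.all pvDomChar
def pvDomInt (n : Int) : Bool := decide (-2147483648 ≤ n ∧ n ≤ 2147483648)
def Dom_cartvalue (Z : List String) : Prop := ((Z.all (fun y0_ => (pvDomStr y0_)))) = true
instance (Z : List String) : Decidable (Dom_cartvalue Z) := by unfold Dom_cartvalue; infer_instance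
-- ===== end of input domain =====

-- B replaces A's count-then-price-after-the-loop with table-driven incremental marginal pricing
-- (each item adds its unit price, or the bundle-completion price when it fills a bundle): alternative algorithm.

-- ===== PORT A =====
def cartvalueStep (s : Int × Int × Int × Int × Int × Int) (x : String) :
    Int × Int × Int × Int × Int × Int :=
  let s := if x = "A" then (s.1 + 1, s.2.1, s.2.2.1, s.2.2.2.1, s.2.2.2.2.1, s.2.2.2.2.2) else s
  let s := if x = "B" then (s.1, s.2.1 + 1, s.2.2.1, s.2.2.2.1, s.2.2.2.2.1, s.2.2.2.2.2) else s
  let s := if x = "C" then (s.1, s.2.1, s.2.2.1 + 1, s.2.2.2.1, 20 * (s.2.2.1 + 1), s.2.2.2.2.2) else s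
  let s := if x = "D" then (s.1, s.2.1, s.2.2.1, s.2.2.2.1 + 1, s.2.2.2.2.1, 15 * (s.2.2.2.1 + 1)) else s
  s

def cartvalue (Z : List String) : Int :=
  let st := Z.foldl cartvalueStep (0, 0, 0, 0, 0, 0)
  let countA := st.1
  let countB := st.2.1
  let sumC := st.2.2.2.2.1
  let sumD := st.2.2.2.2.2
  let p := if countA > 0 then
      (50 * PySem.Int.mod countA 3, 130 * PySem.Int.floordiv countA 3) else ((0 : Int), (0 : Int))
  let q := if countB > 0 then
      (30 * PySem.Int.mod countB 2, 45 * PySem.Int.floordiv countB 2) else ((0 : Int), (0 : Int))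
  p.1 + q.1 + sumC + sumD + p.2 + q.2

-- ===== PORT B =====
-- module-level PRICE table of Source B
def pvPRICE : PySem.Dict String (Int × Int × Int) :=
  PySem.Dict.ofList [("A", (50, 3, 130)), ("B", (30, 2, 45)), ("C", (20, 1, 20)), ("D", (15, 1, 15))]

-- one iteration of Source B's loop: state = (seen, total)
def cartAltStep (s : PySem.Dict String Int × Int) (x : String) : PySem.Dict String Int × Int :=
  match pvPRICE.get? x with
  | none => s
  | some (unit, size, bundle) =>
      let n := s.1.getD x 0 + 1
      (s.1.insert x n,
        s.2 + (if PySem.Int.mod n size = 0 then bundle - (size - 1) * unit else unit))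

def cartvalue_alt (Z : List String) : Int :=
  (Z.foldl cartAltStep (PySem.Dict.empty, 0)).2

-- ===== PRECONDITION & SPEC =====
def Spec_cartvalue (Z : List String) (out : Int) : Prop := out = cartvalue_alt Z
instance (Z : List String) (out : Int) : Decidable (Spec_cartvalue Z out) := by unfold Spec_cartvalue; infer_instance

-- ===== CLAIM (what is proved, stated in full; the proofs are below) =====
def Claim_equal_cartvalue : Prop := ∀ (Z : List String), Dom_cartvalue Z → Spec_cartvalue Z (cartvalue Z)

-- ===== LEMMAS AND PROOFS =====

-- the common closed form both ports are reduced to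
def pvF (a b c d : Int) : Int :=
  130 * (a / 3) + 50 * (a % 3) + 45 * (b / 2) + 30 * (b % 2) + 20 * c + 15 * d

-- A's loop invariant: the fold state is the four counts plus 20*countC, 15*countD
lemma cartvalue_foldl (Z : List String) (cA cB cC cD : Int) :
    Z.foldl cartvalueStep (cA, cB, cC, cD, 20 * cC, 15 * cD) =
      (cA + Z.count "A", cB + Z.count "B", cC + Z.count "C", cD + Z.count "D",
        20 * (cC + Z.count "C"), 15 * (cD + Z.count "D")) := by
  induction Z generalizing cA cB cC cD with
  | nil => simp
  | cons x xs ih =>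
    simp only [List.foldl_cons, cartvalueStep, List.count_cons]
    by_cases hA : x = "A" <;> by_cases hB : x = "B" <;> by_cases hC : x = "C" <;>
      by_cases hD : x = "D" <;>
      simp_all [beq_iff_eq] <;> ring_nf

lemma cartvalue_eq_pvF (Z : List String) :
    cartvalue Z = pvF (Z.count "A") (Z.count "B") (Z.count "C") (Z.count "D") := by
  unfold cartvalue
  have h := cartvalue_foldl Z 0 0 0 0
  simp only [zero_add, mul_zero] at h
  have e1 : PySem.Int.floordiv ((Z.count "A" : Int)) 3 = (Z.count "A" : Int) / 3 :=
    PySem.Int.floordiv_eq_ediv_of_pos (by norm_num)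
  have e2 : PySem.Int.mod ((Z.count "A" : Int)) 3 = (Z.count "A" : Int) % 3 :=
    PySem.Int.mod_eq_emod_of_pos (by norm_num)
  have e3 : PySem.Int.floordiv ((Z.count "B" : Int)) 2 = (Z.count "B" : Int) / 2 :=
    PySem.Int.floordiv_eq_ediv_of_pos (by norm_num)
  have e4 : PySem.Int.mod ((Z.count "B" : Int)) 2 = (Z.count "B" : Int) % 2 :=
    PySem.Int.mod_eq_emod_of_pos (by norm_num)
  simp only [h, e1, e2, e3, e4, pvF]
  have hA : (0 : Int) ≤ Z.count "A" := Int.natCast_nonneg _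
  have hB : (0 : Int) ≤ Z.count "B" := Int.natCast_nonneg _
  split_ifs with h1 h2 h3 <;> omega

-- B's loop invariant: total grows by the pvF-difference of the counts seen so far
lemma cartAlt_foldl (Z : List String) (d : PySem.Dict String Int) (t a b c e : Int)
    (hA : d.getD "A" 0 = a) (hB : d.getD "B" 0 = b)
    (hC : d.getD "C" 0 = c) (hD : d.getD "D" 0 = e) :
    (Z.foldl cartAltStep (d, t)).2 =
      t + pvF (a + Z.count "A") (b + Z.count "B") (c + Z.count "C") (e + Z.count "D")
        - pvF a b c e := by
  induction Z generalizing d t a b c e with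
  | nil => simp
  | cons x xs ih =>
    by_cases hxA : x = "A"
    · subst hxA
      have hget : pvPRICE.get? "A" = some (50, 3, 130) := by decide
      simp only [List.foldl_cons, cartAltStep, hget, hA]
      rw [ih (d.insert "A" (a + 1)) _ (a + 1) b c e
        (by simp [PySem.Dict.getD_insert]) (by simp [PySem.Dict.getD_insert, hA, hB, hC, hD])
        (by simp [PySem.Dict.getD_insert, hA, hB, hC, hD]) (by simp [PySem.Dict.getD_insert, hA, hB, hC, hD])]
      have em : PySem.Int.mod (a + 1) 3 = (a + 1) % 3 := PySem.Int.mod_eq_emod_of_pos (by norm_num)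
      simp only [List.count_cons, beq_iff_eq, em, pvF]
      push_cast
      split_ifs <;> omega
    · by_cases hxB : x = "B"
      · subst hxB
        have hget : pvPRICE.get? "B" = some (30, 2, 45) := by decide
        simp only [List.foldl_cons, cartAltStep, hget, hB]
        rw [ih (d.insert "B" (b + 1)) _ a (b + 1) c e
          (by simp [PySem.Dict.getD_insert, hA, hB, hC, hD]) (by simp [PySem.Dict.getD_insert])
          (by simp [PySem.Dict.getD_insert, hA, hB, hC, hD]) (by simp [PySem.Dict.getD_insert, hA, hB, hC, hD])]
        have em : PySem.Int.mod (b + 1) 2 = (b + 1) % 2 := PySem.Int.mod_eq_emod_of_pos (by norm_num)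
        simp only [List.count_cons, beq_iff_eq, em, pvF]
        push_cast
        split_ifs <;> omega
      · by_cases hxC : x = "C"
        · subst hxC
          have hget : pvPRICE.get? "C" = some (20, 1, 20) := by decide
          simp only [List.foldl_cons, cartAltStep, hget, hC]
          rw [ih (d.insert "C" (c + 1)) _ a b (c + 1) e
            (by simp [PySem.Dict.getD_insert, hA, hB, hC, hD]) (by simp [PySem.Dict.getD_insert, hA, hB, hC, hD])
            (by simp [PySem.Dict.getD_insert]) (by simp [PySem.Dict.getD_insert, hA, hB, hC, hD])]
          have em : PySem.Int.mod (c + 1) 1 = (c + 1) % 1 := PySem.Int.mod_eq_emod_of_pos (by norm_num)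
          simp only [List.count_cons, beq_iff_eq, em, pvF]
          push_cast
          split_ifs <;> omega
        · by_cases hxD : x = "D"
          · subst hxD
            have hget : pvPRICE.get? "D" = some (15, 1, 15) := by decide
            simp only [List.foldl_cons, cartAltStep, hget, hD]
            rw [ih (d.insert "D" (e + 1)) _ a b c (e + 1)
              (by simp [PySem.Dict.getD_insert, hA, hB, hC, hD]) (by simp [PySem.Dict.getD_insert, hA, hB, hC, hD])
              (by simp [PySem.Dict.getD_insert, hA, hB, hC, hD]) (by simp [PySem.Dict.getD_insert])]
            have em : PySem.Int.mod (e + 1) 1 = (e + 1) % 1 := PySem.Int.mod_eq_emod_of_pos (by norm_num)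
            simp only [List.count_cons, beq_iff_eq, em, pvF]
            push_cast
            split_ifs <;> omega
          · have hkeys : pvPRICE.keys = ["A", "B", "C", "D"] := by decide
            have hget : pvPRICE.get? x = none := by
              rw [PySem.Dict.get?_eq_none_iff_not_mem_keys]
              simp [hkeys, hxA, hxB, hxC, hxD]
            simp only [List.foldl_cons, cartAltStep, hget]
            rw [ih d t a b c e hA hB hC hD]
            simp [List.count_cons, hxA, hxB, hxC, hxD]


lemma cartvalue_alt_eq_pvF (Z : List String) :
    cartvalue_alt Z = pvF (Z.count "A") (Z.count "B") (Z.count "C") (Z.count "D") := by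
  unfold cartvalue_alt
  rw [cartAlt_foldl Z PySem.Dict.empty 0 0 0 0 0 (by decide) (by decide) (by decide) (by decide)]
  simp [pvF]

-- ===== VERDICT (by name: the statement is the Claim_ definition above) =====
theorem cartvalue_spec : Claim_equal_cartvalue := by
  intro Z _
  unfold Spec_cartvalue
  rw [cartvalue_eq_pvF, cartvalue_alt_eq_pvF]
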